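-- pv_equiv track=rewrite | github.com/anupyadav27/threat-engine | data_pythonsdk/aws/generate_resource_operations_prioritized.py | prioritize_operations_for_resource
-- ===== SOURCE A (Python) =====
-- from typing import Dict, List, Set, Optional
--
-- def prioritize_operations_for_resource(resource_info: Dict, root_operations: List[str],
--                                        yaml_discovery_ops: Set[str]) -> Dict:
--     """Prioritize operations for a resource."""
--     # Get all operations that produce this resource
--     arn_ops = resource_info.get("arn_producing_operations", [])
--     id_ops = resource_info.get("id_producing_operations", [])
--     all_ops = list(set(arn_ops + id_ops))
--
--     # Categorize operations
--     independent_ops = []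
--     yaml_ops = []
--     other_ops = []
--
--     for op in all_ops:
--         if op in root_operations:
--             independent_ops.append(op)
--         elif op in yaml_discovery_ops:
--             yaml_ops.append(op)
--         else:
--             other_ops.append(op)
--
--     # Build prioritized list
--     prioritized_operations = {
--         "independent": sorted(independent_ops),
--         "yaml_discovery": sorted(yaml_ops),
--         "other": sorted(other_ops),
--         "all": sorted(all_ops)
--     }
--
--     return prioritized_operations
-- ===== SOURCE B (Python) =====
-- def prioritize_operations_for_resource(resource_info, root_operations, yaml_discovery_ops):
--     """Prioritize operations for a resource via set algebra instead of a classification loop."""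
--     all_set = set(resource_info.get("arn_producing_operations", []) +
--                   resource_info.get("id_producing_operations", []))
--     roots = set(root_operations)
--     nonroot = all_set - roots
--     return {
--         "independent": sorted(all_set & roots),
--         "yaml_discovery": sorted(nonroot & yaml_discovery_ops),
--         "other": sorted(nonroot - yaml_discovery_ops),
--         "all": sorted(all_set),
--     }
-- ===== Notes on version B (the rewrite author's own statement) =====
-- stated objective: idiomatic
-- what changed: The per-element if/elif classification loop is replaced by set algebra: the three buckets are computed as intersections/differences of the deduplicated union with the root set (subtracting roots before intersecting with yaml preserves the elif priority).
import Mathlib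
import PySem

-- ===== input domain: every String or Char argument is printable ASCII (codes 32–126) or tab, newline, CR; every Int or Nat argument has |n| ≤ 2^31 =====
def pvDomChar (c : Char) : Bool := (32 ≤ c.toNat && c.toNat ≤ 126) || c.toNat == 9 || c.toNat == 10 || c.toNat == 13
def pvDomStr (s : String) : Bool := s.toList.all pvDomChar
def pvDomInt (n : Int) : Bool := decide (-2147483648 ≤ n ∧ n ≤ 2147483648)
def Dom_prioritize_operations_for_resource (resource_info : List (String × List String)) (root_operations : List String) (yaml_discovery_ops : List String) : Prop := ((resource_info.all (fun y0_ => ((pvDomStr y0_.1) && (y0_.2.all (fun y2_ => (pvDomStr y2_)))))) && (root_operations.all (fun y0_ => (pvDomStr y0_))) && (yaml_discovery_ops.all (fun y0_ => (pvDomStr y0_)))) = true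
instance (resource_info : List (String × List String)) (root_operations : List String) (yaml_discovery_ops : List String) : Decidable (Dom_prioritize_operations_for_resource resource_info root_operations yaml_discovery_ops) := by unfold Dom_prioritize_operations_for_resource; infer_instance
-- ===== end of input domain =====

-- B computes the priority buckets by set algebra (intersection/difference) instead of A's if/elif classification loop; equal sorted outputs.
-- ===== PORT A =====
def prioritize_operations_for_resource (resource_info : List (String × List String)) (root_operations : List String) (yaml_discovery_ops : List String) : List (String × List String) :=
  let arn_ops := PySem.Dict.getD (PySem.Dict.ofList resource_info) "arn_producing_operations" []
  let id_ops := PySem.Dict.getD (PySem.Dict.ofList resource_info) "id_producing_operations" []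
  -- list(set(arn_ops + id_ops)): Python's set iteration order is not modelled; all_ops is
  -- consumed only through sorted() without a key, so any dedup order gives the same result.
  let all_ops : List String := PySem.Set.ofList (arn_ops ++ id_ops)
  let triple := all_ops.foldl (fun (acc : List String × List String × List String) op =>
      if root_operations.contains op then (acc.1 ++ [op], acc.2.1, acc.2.2)
      else if yaml_discovery_ops.contains op then (acc.1, acc.2.1 ++ [op], acc.2.2)
      else (acc.1, acc.2.1, acc.2.2 ++ [op])) ([], [], [])
  [("independent", PySem.List.sorted triple.1 (fun x => x)),
   ("yaml_discovery", PySem.List.sorted triple.2.1 (fun x => x)),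
   ("other", PySem.List.sorted triple.2.2 (fun x => x)),
   ("all", PySem.List.sorted all_ops (fun x => x))]

-- ===== PORT B =====
def prioritize_operations_for_resource_alt (resource_info : List (String × List String)) (root_operations : List String) (yaml_discovery_ops : List String) : List (String × List String) :=
  let all_set : PySem.Set String := PySem.Set.ofList
      (PySem.Dict.getD (PySem.Dict.ofList resource_info) "arn_producing_operations" [] ++
       PySem.Dict.getD (PySem.Dict.ofList resource_info) "id_producing_operations" [])
  let roots : PySem.Set String := PySem.Set.ofList root_operations
  let nonroot : PySem.Set String := PySem.Set.diff all_set roots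
  [("independent", PySem.List.sorted (PySem.Set.inter all_set roots) (fun x => x)),
   ("yaml_discovery", PySem.List.sorted (PySem.Set.inter nonroot yaml_discovery_ops) (fun x => x)),
   ("other", PySem.List.sorted (PySem.Set.diff nonroot yaml_discovery_ops) (fun x => x)),
   ("all", PySem.List.sorted all_set (fun x => x))]

-- ===== PRECONDITION & SPEC =====
def Spec_prioritize_operations_for_resource (resource_info : List (String × List String)) (root_operations : List String) (yaml_discovery_ops : List String) (out : List (String × List String)) : Prop := out = prioritize_operations_for_resource_alt resource_info root_operations yaml_discovery_ops
instance (resource_info : List (String × List String)) (root_operations : List String) (yaml_discovery_ops : List String) (out : List (String × List String)) : Decidable (Spec_prioritize_operations_for_resource resource_info root_operations yaml_discovery_ops out) := by unfold Spec_prioritize_operations_for_resource; infer_instance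

-- ===== CLAIM (what is proved, stated in full; the proofs are below) =====
def Claim_equal_prioritize_operations_for_resource : Prop := ∀ (resource_info : List (String × List String)) (root_operations : List String) (yaml_discovery_ops : List String), Dom_prioritize_operations_for_resource resource_info root_operations yaml_discovery_ops → Spec_prioritize_operations_for_resource resource_info root_operations yaml_discovery_ops (prioritize_operations_for_resource resource_info root_operations yaml_discovery_ops)

-- ===== LEMMAS AND PROOFS =====
theorem pv_tripleFold (p q : String → Bool) (l : List String) (a b c : List String) :
    l.foldl (fun (acc : List String × List String × List String) op =>
      if p op then (acc.1 ++ [op], acc.2.1, acc.2.2)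
      else if q op then (acc.1, acc.2.1 ++ [op], acc.2.2)
      else (acc.1, acc.2.1, acc.2.2 ++ [op])) (a, b, c) =
    (a ++ l.filter p,
     b ++ l.filter (fun x => !p x && q x),
     c ++ l.filter (fun x => !p x && !q x)) := by
  induction l generalizing a b c with
  | nil => simp
  | cons x xs ih =>
    by_cases hp : p x
    · simp [List.foldl_cons, hp, ih]
    · by_cases hq : q x <;> simp [List.foldl_cons, hp, hq, ih]

theorem pv_contains_ofList (roots : List String) (x : String) :
    (PySem.Set.ofList roots).contains x = roots.contains x := by
  rw [Bool.eq_iff_iff]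
  simp [PySem.Set.mem_ofList]


-- ===== VERDICT (by name: the statement is the Claim_ definition above) =====
theorem pv_filter_root (all root : List String) :
    all.filter (fun x => root.contains x) = all.filter (fun x => (PySem.Set.ofList root).contains x) :=
  List.filter_congr (fun x _ => (pv_contains_ofList root x).symm)

theorem pv_filter_yaml (all root yaml : List String) :
    all.filter (fun x => !root.contains x && yaml.contains x) =
      (all.filter (fun x => !(PySem.Set.ofList root).contains x)).filter (fun x => yaml.contains x) := by
  rw [List.filter_filter]
  exact List.filter_congr (fun x _ => by rw [pv_contains_ofList, Bool.and_comm])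

theorem pv_filter_other (all root yaml : List String) :
    all.filter (fun x => !root.contains x && !yaml.contains x) =
      (all.filter (fun x => !(PySem.Set.ofList root).contains x)).filter (fun x => !yaml.contains x) := by
  rw [List.filter_filter]
  exact List.filter_congr (fun x _ => by rw [pv_contains_ofList, Bool.and_comm])

theorem prioritize_operations_for_resource_spec : Claim_equal_prioritize_operations_for_resource := by
  intro resource_info root_operations yaml_discovery_ops _
  unfold Spec_prioritize_operations_for_resource
  simp only [prioritize_operations_for_resource, prioritize_operations_for_resource_alt,
    pv_tripleFold, PySem.Set.inter, PySem.Set.diff, List.nil_append]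
  rw [pv_filter_root, pv_filter_yaml, pv_filter_other]
  rfl
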